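-- pv_equiv track=rewrite | github.com/KMFODA/arbos | arbos.py | _join_stream_text_chunks
-- ===== SOURCE A (Python) =====
-- def _join_stream_text_chunks(parts: list[str]) -> str:
--     """Join Claude stream-json text deltas without gluing sentences together.
--
--     Sequential deltas often omit whitespace at boundaries (e.g. ``...tests.`` +
--     ``Building...``). Insert a newline when sentence-ending punctuation meets a
--     capital letter so context logs and Telegram stay readable; this avoids
--     splitting inside words (``Build`` + ``ing``).
--     """
--     out: list[str] = []
--     for t in parts:
--         if not t:
--             continue
--         if out:
--             prev = out[-1]
--             if (
--                 prev
--                 and t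
--                 and (not prev[-1].isspace())
--                 and (not t[0].isspace())
--                 and prev[-1] in ".!?"
--                 and t[0].isupper()
--             ):
--                 out.append("\n")
--         out.append(t)
--     return "".join(out)
-- ===== SOURCE B (Python) =====
-- def _join_stream_text_chunks(parts: list[str]) -> str:
--     """Right-to-left rewrite: walk the chunks backwards, remembering the first
--     character of the suffix built so far, and emit pieces back-to-front."""
--     pieces = []          # collected in reverse order
--     first = ""           # first character of the joined suffix so far
--     for head in reversed(parts):
--         if not head:
--             continue
--         if first and head[-1] in ".!?" and first.isupper():
--             pieces.append("\n")
--         pieces.append(head)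
--         first = head[0]
--     return "".join(reversed(pieces))
-- ===== Notes on version B (the rewrite author's own statement) =====
-- stated objective: alternative
-- what changed: Replaces A's forward accumulator loop with lookback at out[-1] by a right-to-left traversal that builds the output back-to-front, deciding each newline from the remembered first character of the suffix built so far.
import Mathlib
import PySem

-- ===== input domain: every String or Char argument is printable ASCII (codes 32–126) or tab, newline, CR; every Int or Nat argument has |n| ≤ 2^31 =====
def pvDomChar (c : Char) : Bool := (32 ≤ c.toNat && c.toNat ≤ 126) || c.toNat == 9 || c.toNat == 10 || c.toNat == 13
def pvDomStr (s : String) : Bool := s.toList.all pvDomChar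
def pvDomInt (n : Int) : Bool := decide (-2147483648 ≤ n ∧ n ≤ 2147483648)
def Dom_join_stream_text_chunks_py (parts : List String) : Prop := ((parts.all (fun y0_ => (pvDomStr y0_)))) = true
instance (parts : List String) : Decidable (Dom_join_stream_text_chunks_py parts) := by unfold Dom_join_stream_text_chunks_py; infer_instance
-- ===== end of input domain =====

-- B traverses the chunks right-to-left, building the output back-to-front and deciding each
-- newline from the remembered first character of the suffix built so far; same cost as A.

-- ===== PORT A =====
-- the boundary test of A, evaluated left to right as in the Python source
def pvCondA (prev t : List Char) : Bool :=
  if prev = [] then false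
  else if t = [] then false
  else
    match prev.getLast?, t.head? with
    | some p, some c =>
        !PySem.Chars.isspace p && !PySem.Chars.isspace c &&
        ['.', '!', '?'].contains p && PySem.Chars.isupper c
    | _, _ => false

-- one iteration of A's loop body over the accumulator `out`
def pvStepA (out : List (List Char)) (t : List Char) : List (List Char) :=
  if t = [] then out
  else
    let out' :=
      if out = [] then out
      else
        match out.getLast? with
        | some prev => if pvCondA prev t then out ++ [['\n']] else out
        | none => out
    out' ++ [t]

def join_stream_text_chunks_py (parts : List String) : String :=
  String.ofList (PySem.Chars.join [] (parts.foldl (fun out t => pvStepA out t.toList) []))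

-- ===== PORT B =====
-- B's test: `first and head[-1] in ".!?" and first.isupper()` (first is "" or a one-char string)
def pvCondB (first head : List Char) : Bool :=
  if first = [] then false
  else
    (match head.getLast? with
     | some p => ['.', '!', '?'].contains p
     | none => false)
    && (match first with        -- str.isupper on a single ASCII char
        | [c] => PySem.Chars.isupper c
        | _ => false)

-- one iteration of B's backwards loop; state = (pieces collected in reverse, first char of suffix)
def pvStepB (st : List (List Char) × List Char) (head : List Char) : List (List Char) × List Char :=
  if head = [] then st
  else
    let pieces := if pvCondB st.2 head then st.1 ++ [['\n']] else st.1
    (pieces ++ [head], head.take 1)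

def join_stream_text_chunks_py_alt (parts : List String) : String :=
  String.ofList (PySem.Chars.join []
    (parts.reverse.foldl (fun st h => pvStepB st h.toList) ([], [])).1.reverse)

-- ===== PRECONDITION & SPEC =====
def Spec_join_stream_text_chunks_py (parts : List String) (out : String) : Prop := out = join_stream_text_chunks_py_alt parts
instance (parts : List String) (out : String) : Decidable (Spec_join_stream_text_chunks_py parts out) := by unfold Spec_join_stream_text_chunks_py; infer_instance

-- ===== CLAIM (what is proved, stated in full; the proofs are below) =====
def Claim_equal_join_stream_text_chunks_py : Prop := ∀ (parts : List String), Dom_join_stream_text_chunks_py parts → Spec_join_stream_text_chunks_py parts (join_stream_text_chunks_py parts)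

-- ===== LEMMAS AND PROOFS =====

-- the common separator value of an adjacent pair of (nonempty) chunks
def pvSepB (prev t : List Char) : List Char :=
  match prev.getLast?, t.head? with
  | some p, some c => if ['.', '!', '?'].contains p && PySem.Chars.isupper c then ['\n'] else []
  | _, _ => []

-- the intended joined text of a list of nonempty chunks, defined front-to-back
def pvJ : List (List Char) → List Char
  | [] => []
  | h :: rest =>
      h ++ (match rest.head? with
            | some g => pvSepB h g
            | none => []) ++ pvJ rest

-- first character (as a ≤1-char list) of the first chunk
def pvFirstChar : List (List Char) → List Char
  | [] => []
  | h :: _ => h.take 1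

theorem pv_upper_not_space (c : Char) (h : PySem.Chars.isupper c = true) : PySem.Chars.isspace c = false := by
  simp only [PySem.Chars.isupper, Bool.and_eq_true, decide_eq_true_eq, Char.le_def,
    UInt32.le_iff_toNat_le] at h
  have h1 : 65 ≤ c.val.toNat := by simpa [show ('A' : Char).val.toNat = 65 from rfl] using h.1
  have h2 : c.val.toNat ≤ 90 := by simpa [show ('Z' : Char).val.toNat = 90 from rfl] using h.2
  clear h
  unfold PySem.Chars.isspace
  simp only [Bool.or_eq_false_iff, Bool.and_eq_false_iff, decide_eq_false_iff_not, Char.toNat]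
  omega

-- "p ∈ .!?" forces "p not whitespace", "t[0] upper" forces "t[0] not whitespace": A's test gives pvSepB
theorem pv_cond_eq (prev t : List Char) (hp : prev ≠ []) (ht : t ≠ []) :
    pvSepB prev t = (if pvCondA prev t then ['\n'] else []) := by
  obtain ⟨p, hpl⟩ := List.getLast?_isSome.2 hp |> Option.isSome_iff_exists.1
  obtain ⟨c, hch⟩ : ∃ c, t.head? = some c := by
    cases t with
    | nil => exact absurd rfl ht
    | cons a l => exact ⟨a, rfl⟩
  simp only [pvSepB, pvCondA, if_neg hp, if_neg ht, hpl, hch, List.contains_eq_mem,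
    List.mem_cons, List.not_mem_nil, or_false, decide_eq_true_eq, Bool.and_eq_true,
    Bool.not_eq_true']
  by_cases hmem : p = '.' ∨ p = '!' ∨ p = '?'
  · by_cases hup : PySem.Chars.isupper c = true
    · have hps : PySem.Chars.isspace p = false := by
        rcases hmem with h | h | h <;> subst h <;> decide
      have hcs := pv_upper_not_space c hup
      rw [if_pos ⟨hmem, hup⟩, if_pos ⟨⟨⟨hps, hcs⟩, hmem⟩, hup⟩]
    · rw [if_neg (by tauto), if_neg (by tauto)]
  · rw [if_neg (by tauto), if_neg (by tauto)]

-- B's test on (first char of g, h) gives the same separator pvSepB h g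
theorem pv_condB_eq (h g : List Char) (hh : h ≠ []) (hg : g ≠ []) :
    (if pvCondB (g.take 1) h then ['\n'] else []) = pvSepB h g := by
  obtain ⟨p, hpl⟩ := List.getLast?_isSome.2 hh |> Option.isSome_iff_exists.1
  cases g with
  | nil => exact absurd rfl hg
  | cons c gs =>
      simp [pvCondB, pvSepB, hpl, List.take]

theorem pv_join_nil_flatten (xs : List (List Char)) : PySem.Chars.join [] xs = xs.flatten := by
  induction xs with
  | nil => rfl
  | cons a t ih =>
      cases t with
      | nil => simp [PySem.Chars.join, List.intercalate]
      | cons b r => rw [PySem.Chars.join_cons_cons, ih]; simp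

-- A's loop skips empty chunks, so folding over the filtered list is the same
theorem pv_fold_filter (parts : List (List Char)) (acc : List (List Char)) :
    parts.foldl pvStepA acc = (parts.filter (fun t => t ≠ [])).foldl pvStepA acc := by
  induction parts generalizing acc with
  | nil => rfl
  | cons t rest ih =>
      by_cases h : t = []
      · subst h
        simp [List.filter, pvStepA, ih]
      · simp only [List.foldl_cons, List.filter_cons, decide_eq_true_eq]
        rw [if_pos (by simpa using h)]
        simp [ih]

-- B's loop skips empty chunks too
theorem pv_fold_filterB (parts : List (List Char)) (st : List (List Char) × List Char) :
    parts.foldl pvStepB st = (parts.filter (fun t => t ≠ [])).foldl pvStepB st := by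
  induction parts generalizing st with
  | nil => rfl
  | cons t rest ih =>
      by_cases h : t = []
      · subst h
        simp [List.filter, pvStepB, ih]
      · simp only [List.foldl_cons, List.filter_cons, decide_eq_true_eq]
        rw [if_pos (by simpa using h)]
        simp [ih]

-- loop invariant: A's loop from a nonempty accumulator appends exactly the pairwise form
theorem pv_run (fs : List (List Char)) :
    ∀ (prev : List Char) (out : List (List Char)),
    (∀ t ∈ fs, t ≠ []) → prev ≠ [] →
    ((fs.foldl pvStepA (out ++ [prev])).flatten : List Char)
      = out.flatten ++ prev ++ (((prev :: fs).zip fs).map (fun p => pvSepB p.1 p.2 ++ p.2)).flatten := by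
  induction fs with
  | nil => intro prev out _ _; simp
  | cons t rest ih =>
      intro prev out hne hprev
      have ht : t ≠ [] := hne t (by simp)
      have hstep : pvStepA (out ++ [prev]) t
          = (out ++ [prev] ++ (if pvCondA prev t then [['\n']] else [])) ++ [t] := by
        simp only [pvStepA, if_neg ht]
        have hlast : (out ++ [prev]).getLast? = some prev := by simp
        rw [if_neg (by simp : ¬ out ++ [prev] = []), hlast]
        by_cases hc : pvCondA prev t
        · simp [hc]
        · simp [hc]
      rw [List.foldl_cons, hstep]
      rw [ih t (out ++ [prev] ++ (if pvCondA prev t then [['\n']] else []))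
            (fun u hu => hne u (by simp [hu])) ht]
      simp only [List.zip_cons_cons, List.map_cons, List.flatten_cons]
      rw [pv_cond_eq prev t hprev ht]
      by_cases hc : pvCondA prev t <;> simp [hc]

-- the pairwise form is pvJ
theorem pv_pairs_eq_J (rest : List (List Char)) :
    ∀ f : List Char,
    f ++ (((f :: rest).zip rest).map (fun p => pvSepB p.1 p.2 ++ p.2)).flatten = pvJ (f :: rest) := by
  induction rest with
  | nil => intro f; simp [pvJ]
  | cons g rs ih =>
      intro f
      have hJ : pvJ (f :: g :: rs) = f ++ pvSepB f g ++ pvJ (g :: rs) := by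
        conv_lhs => rw [pvJ]
        simp [List.append_assoc]
      rw [hJ, ← ih g]
      simp [List.append_assoc]

-- loop invariant for B: folding backwards over a list of nonempty chunks yields (pieces, first)
-- with pieces.reverse.flatten = pvJ l and first = first char of l
theorem pv_runB (l : List (List Char)) (hne : ∀ t ∈ l, t ≠ []) :
    (l.reverse.foldl pvStepB ([], [])).1.reverse.flatten = pvJ l
      ∧ (l.reverse.foldl pvStepB ([], [])).2 = pvFirstChar l := by
  induction l with
  | nil => exact ⟨rfl, rfl⟩
  | cons h rest ih =>
      have hh : h ≠ [] := hne h (by simp)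
      obtain ⟨ih1, ih2⟩ := ih (fun u hu => hne u (by simp [hu]))
      have hfold : (h :: rest).reverse.foldl pvStepB ([], [])
          = pvStepB (rest.reverse.foldl pvStepB ([], [])) h := by
        rw [List.reverse_cons, List.foldl_append, List.foldl_cons, List.foldl_nil]
      rw [hfold]
      set st := rest.reverse.foldl pvStepB ([], []) with hst
      constructor
      · simp only [pvStepB, if_neg hh]
        have hsep : (if pvCondB st.2 h then ['\n'] else [])
            = (match rest.head? with | some g => pvSepB h g | none => []) := by
          cases rest with
          | nil =>
              rw [ih2]
              simp [pvCondB, pvFirstChar]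
          | cons g rs =>
              have hg : g ≠ [] := hne g (by simp)
              rw [ih2]
              simpa [pvFirstChar] using pv_condB_eq h g hh hg
        by_cases hc : pvCondB st.2 h
        · simp only [hc, if_pos] at hsep ⊢
          simp [pvJ, ← hsep, ih1]
        · simp only [hc, if_neg, Bool.false_eq_true, not_false_iff] at hsep ⊢
          simp [pvJ, ← hsep, ih1]
      · simp [pvStepB, if_neg hh, pvFirstChar]

-- ===== VERDICT (by name: the statement is the Claim_ definition above) =====
theorem join_stream_text_chunks_py_spec : Claim_equal_join_stream_text_chunks_py := by
  intro parts _
  show join_stream_text_chunks_py parts = join_stream_text_chunks_py_alt parts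
  unfold join_stream_text_chunks_py join_stream_text_chunks_py_alt
  set filtered := (parts.map String.toList).filter (fun t => t ≠ []) with hf
  have hall : ∀ t ∈ filtered, t ≠ [] := by
    intro t htm
    have := List.of_mem_filter htm
    simpa using this
  -- A's side equals pvJ filtered
  have hA : PySem.Chars.join [] (parts.foldl (fun out t => pvStepA out t.toList) [])
      = pvJ filtered := by
    rw [show parts.foldl (fun out t => pvStepA out t.toList) []
          = (parts.map String.toList).foldl pvStepA [] from by rw [List.foldl_map],
       pv_fold_filter, ← hf, pv_join_nil_flatten]
    cases hfc : filtered with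
    | nil => simp [pvJ]
    | cons f rest =>
        have hfne : f ≠ [] := hall f (by rw [hfc]; simp)
        have hstep0 : pvStepA [] f = [] ++ [f] := by
          simp [pvStepA, if_neg hfne]
        rw [List.foldl_cons, hstep0,
            pv_run rest f [] (fun u hu => hall u (by rw [hfc]; simp [hu])) hfne]
        simpa using pv_pairs_eq_J rest f
  -- B's side equals pvJ filtered
  have hB : PySem.Chars.join []
        ((parts.reverse.foldl (fun st h => pvStepB st h.toList) ([], [])).1.reverse)
      = pvJ filtered := by
    have hmap : parts.reverse.foldl (fun st h => pvStepB st h.toList) ([], [])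
        = filtered.reverse.foldl pvStepB ([], []) := by
      rw [show parts.reverse.foldl (fun st h => pvStepB st h.toList) ([], [])
            = (parts.reverse.map String.toList).foldl pvStepB ([], []) from by
              rw [List.foldl_map],
         List.map_reverse, pv_fold_filterB, List.filter_reverse, ← hf]
    rw [hmap, pv_join_nil_flatten]
    exact (pv_runB filtered hall).1
  rw [hA, hB]
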